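-- pv_equiv track=rewrite | github.com/asmundg/adventofcode | 2025/src/day_01.py | part2
-- ===== SOURCE A (Python) =====
-- def part2(steps: list[int]) -> int:
--     pos = 50
--     count = 0
--     for step in steps:
--         for _ in range(abs(step)):
--             pos = (pos + (-1 if step < 0 else 1)) % 100
--             if pos == 0:
--                 count += 1
--     return count
-- ===== SOURCE B (Python) =====
-- def part2(steps: list[int]) -> int:
--     pos = 50
--     count = 0
--     for step in steps:
--         if step >= 0:
--             count += (pos + step) // 100
--         else:
--             count += (pos - 1) // 100 - (pos + step - 1) // 100
--         pos = (pos + step) % 100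
--     return count
-- ===== Notes on version B (the rewrite author's own statement) =====
-- stated objective: faster
-- what changed: Replaces the unit-by-unit modular walk (one inner iteration per |step|) with per-step floor-division arithmetic counting the multiples of 100 swept by each step in O(1).
import Mathlib
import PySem

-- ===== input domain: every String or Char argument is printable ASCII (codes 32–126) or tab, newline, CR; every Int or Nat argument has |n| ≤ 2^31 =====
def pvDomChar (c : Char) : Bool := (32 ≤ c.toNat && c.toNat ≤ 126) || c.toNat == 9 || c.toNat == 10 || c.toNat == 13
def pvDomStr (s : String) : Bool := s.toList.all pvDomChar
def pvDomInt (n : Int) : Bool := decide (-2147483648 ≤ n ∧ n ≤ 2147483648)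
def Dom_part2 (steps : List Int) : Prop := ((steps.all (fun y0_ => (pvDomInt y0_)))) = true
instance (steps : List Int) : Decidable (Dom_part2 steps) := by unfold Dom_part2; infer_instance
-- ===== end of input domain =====

-- B replaces A's unit-by-unit walk with per-step arithmetic (count multiples of 100 swept via floordiv); asymptotically faster: O(n) instead of O(sum |step|).

-- ===== PORT A =====
-- literal port: pos starts at 50; for each step, |step| unit moves of (pos ± 1) % 100, counting zeros
def part2 (steps : List Int) : Int :=
  (steps.foldl (fun (pc : Int × Int) step =>
      (List.range step.natAbs).foldl (fun (pc : Int × Int) _ =>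
        let p := PySem.Int.mod (pc.1 + (if step < 0 then -1 else 1)) 100
        (p, if p = 0 then pc.2 + 1 else pc.2)) pc)
    (50, 0)).2

-- ===== PORT B =====
def part2_alt (steps : List Int) : Int :=
  (steps.foldl (fun (pc : Int × Int) step =>
      let c := if step ≥ 0 then PySem.Int.floordiv (pc.1 + step) 100
               else PySem.Int.floordiv (pc.1 - 1) 100 - PySem.Int.floordiv (pc.1 + step - 1) 100
      (PySem.Int.mod (pc.1 + step) 100, pc.2 + c))
    (50, 0)).2

-- ===== PRECONDITION & SPEC =====
def Spec_part2 (steps : List Int) (out : Int) : Prop := out = part2_alt steps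
instance (steps : List Int) (out : Int) : Decidable (Spec_part2 steps out) := by unfold Spec_part2; infer_instance

-- ===== CLAIM (what is proved, stated in full; the proofs are below) =====
def Claim_equal_part2 : Prop := ∀ (steps : List Int), Dom_part2 steps → Spec_part2 steps (part2 steps)

-- ===== LEMMAS AND PROOFS =====

-- A's inner unit-step loop, factored out for the invariant lemmas
def stepA (d : Int) (pc : Int × Int) : Int × Int :=
  let p := PySem.Int.mod (pc.1 + d) 100
  (p, if p = 0 then pc.2 + 1 else pc.2)

lemma inner_up (n : Nat) : ∀ (pos count : Int), 0 ≤ pos → pos < 100 →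
    (List.range n).foldl (fun pc _ => stepA 1 pc) (pos, count)
      = (PySem.Int.mod (pos + n) 100, count + PySem.Int.floordiv (pos + n) 100) := by
  induction n with
  | zero =>
    intro pos count h0 h1
    simp
    constructor
    · omega
    · omega
  | succ n ih =>
    intro pos count h0 h1
    rw [List.range_succ, List.foldl_append, ih pos count h0 h1]
    simp only [List.foldl_cons, List.foldl_nil, stepA,
      PySem.Int.mod_eq_emod_of_pos (by norm_num : (0:Int) < 100),
      PySem.Int.floordiv_eq_ediv_of_pos (by norm_num : (0:Int) < 100)]
    push_cast
    rw [Prod.mk.injEq]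
    refine ⟨by omega, ?_⟩
    split_ifs with h <;> omega

lemma inner_down (n : Nat) : ∀ (pos count : Int), 0 ≤ pos → pos < 100 →
    (List.range n).foldl (fun pc _ => stepA (-1) pc) (pos, count)
      = (PySem.Int.mod (pos - n) 100,
         count + (PySem.Int.floordiv (pos - 1) 100 - PySem.Int.floordiv (pos - n - 1) 100)) := by
  induction n with
  | zero =>
    intro pos count h0 h1
    simp
    omega
  | succ n ih =>
    intro pos count h0 h1
    rw [List.range_succ, List.foldl_append, ih pos count h0 h1]
    simp only [List.foldl_cons, List.foldl_nil, stepA,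
      PySem.Int.mod_eq_emod_of_pos (by norm_num : (0:Int) < 100),
      PySem.Int.floordiv_eq_ediv_of_pos (by norm_num : (0:Int) < 100)]
    push_cast
    rw [Prod.mk.injEq]
    refine ⟨by omega, ?_⟩
    split_ifs with h <;> omega

-- one outer iteration of A equals one outer iteration of B, for pos ∈ [0,100)
lemma outer_step (step pos count : Int) (h0 : 0 ≤ pos) (h1 : pos < 100) :
    (List.range step.natAbs).foldl (fun pc _ => stepA (if step < 0 then -1 else 1) pc) (pos, count)
      = (PySem.Int.mod (pos + step) 100,
         count + (if step ≥ 0 then PySem.Int.floordiv (pos + step) 100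
                  else PySem.Int.floordiv (pos - 1) 100 - PySem.Int.floordiv (pos + step - 1) 100)) := by
  by_cases hs : step < 0
  · have hcast : (step.natAbs : Int) = -step := by omega
    simp only [if_pos hs, if_neg (by omega : ¬ step ≥ 0)]
    rw [inner_down step.natAbs pos count h0 h1, hcast]
    ring_nf
  · have hcast : (step.natAbs : Int) = step := by omega
    simp only [if_neg hs, if_pos (by omega : step ≥ 0)]
    rw [inner_up step.natAbs pos count h0 h1, hcast]

lemma fold_eq (steps : List Int) : ∀ (pos count : Int), 0 ≤ pos → pos < 100 →
    steps.foldl (fun (pc : Int × Int) step =>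
      (List.range step.natAbs).foldl (fun (pc : Int × Int) _ =>
        let p := PySem.Int.mod (pc.1 + (if step < 0 then -1 else 1)) 100
        (p, if p = 0 then pc.2 + 1 else pc.2)) pc) (pos, count)
    = steps.foldl (fun (pc : Int × Int) step =>
        let c := if step ≥ 0 then PySem.Int.floordiv (pc.1 + step) 100
                 else PySem.Int.floordiv (pc.1 - 1) 100 - PySem.Int.floordiv (pc.1 + step - 1) 100
        (PySem.Int.mod (pc.1 + step) 100, pc.2 + c)) (pos, count) := by
  induction steps with
  | nil => intro pos count _ _; rfl
  | cons s rest ih =>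
    intro pos count h0 h1
    simp only [List.foldl_cons]
    have hs : (fun (pc : Int × Int) (_ : Nat) =>
        let p := PySem.Int.mod (pc.1 + (if s < 0 then -1 else 1)) 100
        (p, if p = 0 then pc.2 + 1 else pc.2)) = fun pc _ => stepA (if s < 0 then -1 else 1) pc := by
      funext pc x; rfl
    rw [hs, outer_step s pos count h0 h1]
    exact ih _ _ (PySem.Int.mod_nonneg _ (by norm_num)) (PySem.Int.mod_lt _ (by norm_num))

-- ===== VERDICT (by name: the statement is the Claim_ definition above) =====
theorem part2_spec : Claim_equal_part2 := by
  intro steps _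
  unfold Spec_part2 part2 part2_alt
  rw [fold_eq steps 50 0 (by norm_num) (by norm_num)]
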